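-- pv_equiv track=rewrite | github.com/HAawkliu/assignment2-systems | cs336-basics/cs336_basics/tokenization/common.py | _longest_incomplete_special_suffix
-- ===== SOURCE A (Python) =====
-- def _longest_incomplete_special_suffix(
--     text: str,
--     special_tokens: tuple[str, ...],
--     max_special_token_length: int,
-- ) -> int:
--     if not text or not special_tokens or max_special_token_length <= 1:
--         return 0
--     for suffix_len in range(min(max_special_token_length - 1, len(text)), 0, -1):
--         suffix = text[-suffix_len:]
--         if any(len(token) > suffix_len and token.startswith(suffix) for token in special_tokens):
--             return suffix_len
--     return 0
-- ===== SOURCE B (Python) =====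
-- def _longest_incomplete_special_suffix(text, special_tokens, max_special_token_length):
--     # Per-token scan with a running maximum instead of per-suffix-length scan over all tokens.
--     if not text or not special_tokens or max_special_token_length <= 1:
--         return 0
--     window = min(max_special_token_length - 1, len(text))
--     best = 0
--     for token in special_tokens:
--         limit = min(window, len(token) - 1)
--         for k in range(limit, best, -1):
--             if text.endswith(token[:k]):
--                 best = k
--                 break
--     return best
-- ===== Notes on version B (the rewrite author's own statement) =====
-- stated objective: faster
-- what changed: Replaces the suffix-length-first scan (for each length, slice the suffix and test every token) by a token-first pass that, for each special token, scans only lengths above the current best for text.endswith(token[:k]) and keeps a running maximum, so the inner scan is pruned by the best overlap found so far.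
import Mathlib
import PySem

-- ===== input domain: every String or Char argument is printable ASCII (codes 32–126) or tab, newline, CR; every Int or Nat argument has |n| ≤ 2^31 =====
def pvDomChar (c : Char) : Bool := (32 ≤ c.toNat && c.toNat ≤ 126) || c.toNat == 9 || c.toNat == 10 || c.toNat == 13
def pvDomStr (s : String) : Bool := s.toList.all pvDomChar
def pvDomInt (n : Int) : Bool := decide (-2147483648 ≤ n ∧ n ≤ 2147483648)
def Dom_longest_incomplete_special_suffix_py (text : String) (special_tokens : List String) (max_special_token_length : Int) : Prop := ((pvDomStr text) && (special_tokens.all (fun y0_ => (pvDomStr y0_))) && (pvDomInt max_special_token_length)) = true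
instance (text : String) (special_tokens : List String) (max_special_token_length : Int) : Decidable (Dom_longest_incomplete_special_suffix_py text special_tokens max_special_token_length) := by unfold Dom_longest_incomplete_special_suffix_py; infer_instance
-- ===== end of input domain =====

-- B replaces A's suffix-length-first scan by a per-token longest-matching-prefix pass whose inner scan is pruned by the running best (measured faster in a timing run).

-- ===== PORT A =====
-- any(len(token) > suffix_len and token.startswith(text[-suffix_len:]) for token in special_tokens)
def pvAHit (text : String) (special_tokens : List String) (suffix_len : Nat) : Bool :=
  special_tokens.any (fun token =>
    decide ((suffix_len : Int) < PySem.Str.len token) &&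
    PySem.Str.startswith token (PySem.Str.slice text (some (-(suffix_len : Int))) none))

-- for suffix_len in range(min(max_special_token_length - 1, len(text)), 0, -1): …
def pvALoop (text : String) (special_tokens : List String) : Nat → Int
  | 0 => 0
  | k+1 => if pvAHit text special_tokens (k+1) then ((k : Int) + 1) else pvALoop text special_tokens k

def longest_incomplete_special_suffix_py (text : String) (special_tokens : List String) (max_special_token_length : Int) : Int :=
  if text = "" ∨ special_tokens = [] ∨ max_special_token_length ≤ 1 then 0
  else pvALoop text special_tokens (min (max_special_token_length - 1) (PySem.Str.len text)).toNat

-- ===== PORT B =====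
-- for k in range(limit, best, -1): if text.endswith(token[:k]): best = k; break
def pvBTok (text : String) (token : String) (best : Nat) : Nat → Nat
  | 0 => best
  | k+1 =>
    if k+1 ≤ best then best
    else if PySem.Str.endswith text (PySem.Str.slice token none (some ((k : Int) + 1))) then k+1
    else pvBTok text token best k

def longest_incomplete_special_suffix_py_alt (text : String) (special_tokens : List String) (max_special_token_length : Int) : Int :=
  if text = "" ∨ special_tokens = [] ∨ max_special_token_length ≤ 1 then 0
  else
    let window : Int := min (max_special_token_length - 1) (PySem.Str.len text)
    ((special_tokens.foldl
        (fun best token => pvBTok text token best (min window (PySem.Str.len token - 1)).toNat) 0 : Nat) : Int)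

-- ===== PRECONDITION & SPEC =====
def Spec_longest_incomplete_special_suffix_py (text : String) (special_tokens : List String) (max_special_token_length : Int) (out : Int) : Prop := out = longest_incomplete_special_suffix_py_alt text special_tokens max_special_token_length
instance (text : String) (special_tokens : List String) (max_special_token_length : Int) (out : Int) : Decidable (Spec_longest_incomplete_special_suffix_py text special_tokens max_special_token_length out) := by unfold Spec_longest_incomplete_special_suffix_py; infer_instance

-- ===== CLAIM (what is proved, stated in full; the proofs are below) =====
def Claim_equal_longest_incomplete_special_suffix_py : Prop := ∀ (text : String) (special_tokens : List String) (max_special_token_length : Int), Dom_longest_incomplete_special_suffix_py text special_tokens max_special_token_length → Spec_longest_incomplete_special_suffix_py text special_tokens max_special_token_length (longest_incomplete_special_suffix_py text special_tokens max_special_token_length)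

-- ===== LEMMAS AND PROOFS =====

-- "greatest k in [1,n] with P k, else 0"
def pvG (P : Nat → Bool) : Nat → Nat
  | 0 => 0
  | n+1 => if P (n+1) then n+1 else pvG P n

theorem pvG_le (P : Nat → Bool) (n : Nat) : pvG P n ≤ n := by
  induction n with
  | zero => simp [pvG]
  | succ n ih => simp only [pvG]; split <;> omega

theorem pvG_congr (P Q : Nat → Bool) (n : Nat)
    (h : ∀ k, 1 ≤ k → k ≤ n → P k = Q k) : pvG P n = pvG Q n := by
  induction n with
  | zero => rfl
  | succ n ih =>
    simp only [pvG, h (n+1) (by omega) (le_refl _)]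
    rw [ih (fun k h1 h2 => h k h1 (by omega))]

theorem pvG_false (n : Nat) : pvG (fun _ => false) n = 0 := by
  induction n with
  | zero => rfl
  | succ n ih => simpa [pvG] using ih

theorem pvG_or (P Q : Nat → Bool) (n : Nat) :
    pvG (fun k => P k || Q k) n = max (pvG P n) (pvG Q n) := by
  induction n with
  | zero => rfl
  | succ n ih =>
    simp only [pvG]
    have hp' := pvG_le P n
    have hq' := pvG_le Q n
    by_cases hp : P (n+1) = true <;> by_cases hq : Q (n+1) = true <;>
      simp [hp, hq, ih] <;> omega

theorem pvG_trim (P Q : Nat → Bool) (m n : Nat)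
    (h : ∀ k, 1 ≤ k → (P k = true ↔ (k ≤ m ∧ Q k = true))) :
    pvG P n = pvG Q (min n m) := by
  induction n with
  | zero => simp [pvG]
  | succ n ih =>
    by_cases hm : n + 1 ≤ m
    · have h1 : min (n+1) m = n + 1 := by omega
      have hmn : min n m = n := by omega
      have hPQ : P (n+1) = Q (n+1) := by
        have hiff := h (n+1) (by omega)
        rw [Bool.eq_iff_iff]
        exact ⟨fun hp => (hiff.1 hp).2, fun hq => hiff.2 ⟨hm, hq⟩⟩
      rw [h1]
      simp only [pvG]
      rw [hPQ, ih, hmn]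
    · have hP : P (n+1) = false := by
        rcases Bool.eq_false_or_eq_true (P (n+1)) with hp | hp
        · exact absurd ((h (n+1) (by omega)).1 hp).1 (by omega)
        · exact hp
      have hmm : min (n+1) m = min n m := by omega
      simp only [pvG, hP, Bool.false_eq_true, if_false]
      rw [ih, hmm]

theorem pvFoldl_max_shift {α : Type} (g : α → Nat) (ts : List α) (b : Nat) :
    List.foldl (fun acc t => max acc (g t)) b ts
      = max b (List.foldl (fun acc t => max acc (g t)) 0 ts) := by
  induction ts generalizing b with
  | nil => simp
  | cons t ts ih =>
    simp only [List.foldl_cons]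
    rw [ih (max b (g t)), ih (max 0 (g t))]
    omega

theorem pvG_any {α : Type} (Qt : α → Nat → Bool) (ts : List α) (n : Nat) :
    pvG (fun k => ts.any (fun t => Qt t k)) n
      = ts.foldl (fun b t => max b (pvG (Qt t) n)) 0 := by
  induction ts with
  | nil => simpa using pvG_false n
  | cons t ts ih =>
    have hsplit : pvG (fun k => (t :: ts).any (fun t' => Qt t' k)) n
        = max (pvG (Qt t) n) (pvG (fun k => ts.any (fun t' => Qt t' k)) n) := by
      simpa [List.any_cons] using pvG_or (Qt t) (fun k => ts.any (fun t' => Qt t' k)) n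
    rw [hsplit, ih, List.foldl_cons]
    conv_rhs => rw [pvFoldl_max_shift]
    simp

theorem pvBTok_eq (text token : String) (best k : Nat) :
    pvBTok text token best k
      = max best (pvG (fun j => PySem.Str.endswith text (PySem.Str.slice token none (some (j : Int)))) k) := by
  induction k with
  | zero => simp [pvBTok, pvG]
  | succ k ih =>
    have hle := pvG_le (fun j => PySem.Str.endswith text (PySem.Str.slice token none (some (j : Int)))) k
    have hcast : ((k : Int) + 1) = (((k+1 : Nat)) : Int) := by push_cast; ring
    simp only [pvBTok, pvG, hcast]
    by_cases hb : k + 1 ≤ best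
    · rw [if_pos hb]
      split <;> omega
    · rw [if_neg hb]
      by_cases he : PySem.Str.endswith text (PySem.Str.slice token none (some (((k+1 : Nat)) : Int))) = true
      · simp only [he, if_true]
        omega
      · simp only [he, Bool.false_eq_true, if_false]
        exact ih

-- core string fact: token.startswith(text[-k:])  =  text.endswith(token[:k])  (for 1 ≤ k ≤ |text|, k < |token|)
theorem pvStartsEnds (s t : List Char) (k : Nat) (hk : k ≤ s.length) (ht : k ≤ t.length) :
    (PySem.Chars.startswith t (s.drop (s.length - k)) = PySem.Chars.endswith s (t.take k)) := by
  rw [Bool.eq_iff_iff, PySem.Chars.startswith_iff, PySem.Chars.endswith_iff]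
  have hdlen : (s.drop (s.length - k)).length = k := by simp; omega
  have htlen : (t.take k).length = k := by simp; omega
  constructor
  · intro h
    rw [List.prefix_iff_eq_take, hdlen] at h
    rw [List.suffix_iff_eq_drop, htlen, ← h]
  · intro h
    rw [List.suffix_iff_eq_drop, htlen] at h
    rw [List.prefix_iff_eq_take, hdlen, ← h]

theorem pvALoop_eq (text : String) (special_tokens : List String) (n : Nat) :
    pvALoop text special_tokens n = ((pvG (pvAHit text special_tokens) n : Nat) : Int) := by
  induction n with
  | zero => simp [pvALoop, pvG]
  | succ n ih =>
    simp only [pvALoop, pvG]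
    split
    · push_cast; ring
    · exact ih

theorem pvLen_eq (s : String) : PySem.Str.len s = (s.toList.length : Int) := by
  simp [PySem.Str.len_eq]

-- the per-suffix-length "any token" predicate rewritten token-wise (for 1 ≤ k ≤ |text|)
theorem pvAHit_eq (text : String) (special_tokens : List String) (k : Nat)
    (h1 : 1 ≤ k) (h2 : k ≤ text.toList.length) :
    pvAHit text special_tokens k
      = special_tokens.any (fun token =>
          decide ((k : Int) < PySem.Str.len token) &&
          PySem.Str.endswith text (PySem.Str.slice token none (some (k : Int)))) := by
  unfold pvAHit
  congr 1
  funext token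
  by_cases hlt : (k : Int) < PySem.Str.len token
  · have hkt : k ≤ token.toList.length := by
      rw [pvLen_eq] at hlt; exact_mod_cast le_of_lt hlt
    simp only [hlt, decide_true, Bool.true_and]
    rw [PySem.Str.startswith_eq, PySem.Str.endswith_eq, PySem.Str.toList_slice, PySem.Str.toList_slice,
        PySem.Chars.slice_eq_listSlice, PySem.Chars.slice_eq_listSlice,
        PySem.List.slice_from_neg_natCast _ k (by omega), PySem.List.slice_to_natCast]
    exact pvStartsEnds text.toList token.toList k h2 hkt
  · have hf : decide (k < token.length) = false := by
      rw [pvLen_eq] at hlt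
      have h3 : (String.toList token).length = token.length := String.length_toList
      simp only [decide_eq_false_iff_not]
      omega
    simp [hf]

theorem pvToList_ne_nil (s : String) (h : s ≠ "") : s.toList ≠ [] := by
  intro hc
  apply h
  have : s.toList = ("" : String).toList := by simpa using hc
  exact String.toList_inj.mp this

-- ===== VERDICT (by name: the statement is the Claim_ definition above) =====
theorem longest_incomplete_special_suffix_py_spec : Claim_equal_longest_incomplete_special_suffix_py := by
  intro text special_tokens m _
  unfold Spec_longest_incomplete_special_suffix_py
  unfold longest_incomplete_special_suffix_py longest_incomplete_special_suffix_py_alt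
  by_cases hg : text = "" ∨ special_tokens = [] ∨ m ≤ 1
  · simp [hg]
  · rw [if_neg hg, if_neg hg]
    push Not at hg
    obtain ⟨ht, _, hm⟩ := hg
    have htlen : 1 ≤ text.toList.length :=
      List.length_pos_iff.mpr (pvToList_ne_nil text ht)
    set window : Int := min (m - 1) (PySem.Str.len text) with hwdef
    have hwin_pos : 1 ≤ window := by
      rw [hwdef, pvLen_eq]; omega
    have hwin_le : window.toNat ≤ text.toList.length := by
      rw [hwdef, pvLen_eq]; omega
    rw [pvALoop_eq]
    congr 1
    rw [pvG_congr _ _ _ (fun k hk1 hk2 => pvAHit_eq text special_tokens k hk1 (le_trans hk2 hwin_le))]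
    rw [pvG_any (fun (token : String) k =>
          decide ((k : Int) < PySem.Str.len token) &&
          PySem.Str.endswith text (PySem.Str.slice token none (some (k : Int))))]
    congr 1
    funext best token
    rw [pvBTok_eq]
    congr 1
    rw [pvG_trim _ (fun j => PySem.Str.endswith text (PySem.Str.slice token none (some (j : Int))))
          (token.toList.length - 1) window.toNat
          (by
            intro k hk
            rw [pvLen_eq]
            constructor
            · intro hh
              simp only [Bool.and_eq_true, decide_eq_true_eq] at hh
              exact ⟨by omega, hh.2⟩
            · intro ⟨hle, he⟩
              simp only [Bool.and_eq_true, decide_eq_true_eq]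
              exact ⟨by omega, he⟩)]
    congr 1
    rw [pvLen_eq]
    omega
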